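-- pv_equiv track=rewrite | github.com/pavelaizen/iptv-playlist | app/main.py | extract_channel_name
-- ===== SOURCE A (Python) =====
-- def extract_channel_name(metadata_lines: list[str]) -> str:
--     for line in reversed(metadata_lines):
--         stripped = line.strip()
--         if not stripped.upper().startswith("#EXTINF"):
--             continue
--         _, _, candidate = stripped.rpartition(",")
--         candidate = candidate.strip()
--         if candidate:
--             return candidate
--     return "unnamed-channel"
-- ===== SOURCE B (Python) =====
-- def extract_channel_name(metadata_lines: list[str]) -> str:
--     result = "unnamed-channel"
--     for line in metadata_lines:
--         stripped = line.strip()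
--         if stripped[:7].upper() == "#EXTINF":
--             candidate = stripped.rsplit(",", 1)[-1].strip()
--             if candidate:
--                 result = candidate
--     return result
-- ===== Notes on version B (the rewrite author's own statement) =====
-- stated objective: simpler
-- what changed: B replaces A's reverse scan with early return by a single forward pass that keeps an accumulator overwritten on every qualifying EXTINF line (and tests the first 7 characters / rsplit instead of upper().startswith / rpartition).
import Mathlib
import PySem

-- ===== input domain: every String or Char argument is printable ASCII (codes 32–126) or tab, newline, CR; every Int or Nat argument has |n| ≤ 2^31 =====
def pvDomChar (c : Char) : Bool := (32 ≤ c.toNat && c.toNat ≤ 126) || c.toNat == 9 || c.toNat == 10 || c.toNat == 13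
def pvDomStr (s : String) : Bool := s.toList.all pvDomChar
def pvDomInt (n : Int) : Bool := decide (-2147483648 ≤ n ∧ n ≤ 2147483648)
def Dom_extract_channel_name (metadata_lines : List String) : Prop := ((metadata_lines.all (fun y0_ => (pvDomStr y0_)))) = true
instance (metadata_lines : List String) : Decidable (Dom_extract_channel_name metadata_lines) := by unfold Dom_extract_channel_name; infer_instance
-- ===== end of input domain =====

-- B is a forward single pass keeping an accumulator that is overwritten on every
-- qualifying line (objective: simpler decomposition), instead of A's reverse scan
-- with early return; same return value, no side effects.

-- ===== PORT A =====
-- A scans reversed(metadata_lines), returning at the first qualifying line.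
def extractGoA : List String → String
  | [] => "unnamed-channel"
  | line :: rest =>
      let stripped := PySem.Str.strip line
      if ¬ PySem.Str.startswith (PySem.Str.upper stripped) "#EXTINF" then extractGoA rest
      else
        -- stripped.rpartition(","): the part after the last ',' (whole string if none)
        let i := PySem.Str.rfind stripped ","
        let candidate := PySem.Str.strip
          (if i < 0 then stripped else PySem.Str.slice stripped (some (i + 1)) none)
        if candidate ≠ "" then candidate else extractGoA rest

def extract_channel_name (metadata_lines : List String) : String :=
  extractGoA metadata_lines.reverse

-- ===== PORT B =====
-- forward foldl with an accumulator, per Source B; line processing on List Char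
def extract_channel_name_alt (metadata_lines : List String) : String :=
  metadata_lines.foldl (fun result line =>
    let stripped := PySem.Chars.strip line.toList
    if PySem.Chars.upper (stripped.take 7) = "#EXTINF".toList then
      -- stripped.rsplit(",", 1): split once at the last ','
      let i := PySem.Chars.rfind stripped [',']
      let parts := if i < 0 then [stripped]
                   else [stripped.take i.toNat, stripped.drop (i.toNat + 1)]
      -- parts[-1]
      let candidate := PySem.Chars.strip ((PySem.List.pyGet? parts (-1)).getD [])
      if candidate ≠ [] then String.ofList candidate else result
    else result) "unnamed-channel"

-- ===== PRECONDITION & SPEC =====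
def Spec_extract_channel_name (metadata_lines : List String) (out : String) : Prop := out = extract_channel_name_alt metadata_lines
instance (metadata_lines : List String) (out : String) : Decidable (Spec_extract_channel_name metadata_lines out) := by unfold Spec_extract_channel_name; infer_instance

-- ===== CLAIM (what is proved, stated in full; the proofs are below) =====
def Claim_equal_extract_channel_name : Prop := ∀ (metadata_lines : List String), Dom_extract_channel_name metadata_lines → Spec_extract_channel_name metadata_lines (extract_channel_name metadata_lines)

-- ===== LEMMAS AND PROOFS =====

-- the per-line result both programs compute: `some candidate` iff the line qualifies
def pvOpt (line : String) : Option String :=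
  let stripped := PySem.Str.strip line
  if ¬ PySem.Str.startswith (PySem.Str.upper stripped) "#EXTINF" then none
  else
    let i := PySem.Str.rfind stripped ","
    let candidate := PySem.Str.strip
      (if i < 0 then stripped else PySem.Str.slice stripped (some (i + 1)) none)
    if candidate ≠ "" then some candidate else none

theorem goA_eq (ls : List String) :
    extractGoA ls = (ls.findSome? pvOpt).getD "unnamed-channel" := by
  induction ls with
  | nil => rfl
  | cons line rest ih =>
      simp only [extractGoA, pvOpt, List.findSome?]
      split_ifs with h1 h2 <;> simp [ih]

theorem pyGetLast_one (x : List Char) : (PySem.List.pyGet? [x] (-1)).getD [] = x := rfl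
theorem pyGetLast_two (x y : List Char) : (PySem.List.pyGet? [x, y] (-1)).getD [] = y := rfl

-- B's rsplit-once last piece is "everything after the last comma"
theorem candB_eq (cs : List Char) :
    ((PySem.List.pyGet?
        (if PySem.Chars.rfind cs [','] < 0 then [cs]
         else [cs.take (PySem.Chars.rfind cs [',']).toNat,
               cs.drop ((PySem.Chars.rfind cs [',']).toNat + 1)]) (-1)).getD [])
    = (if PySem.Chars.rfind cs [','] < 0 then cs
       else cs.drop ((PySem.Chars.rfind cs [',']).toNat + 1)) := by
  by_cases hi : PySem.Chars.rfind cs [','] < 0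
  · rw [if_pos hi, if_pos hi, pyGetLast_one]
  · rw [if_neg hi, if_neg hi, pyGetLast_two]

-- B's first-7-chars test is A's startswith on the uppercased string
theorem cond_iff (cs : List Char) :
    (PySem.Chars.upper (cs.take 7) = "#EXTINF".toList)
      ↔ (PySem.Chars.startswith (PySem.Chars.upper cs) "#EXTINF".toList = true) := by
  rw [PySem.Chars.startswith_iff]
  show _ ↔ "#EXTINF".toList <+: List.map PySem.Chars.upperChar cs
  rw [List.prefix_iff_eq_take]
  constructor
  · intro h; rw [← List.map_take]; exact h.symm
  · intro h
    show List.map PySem.Chars.upperChar _ = _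
    rw [List.map_take]; exact h.symm

theorem stepB_eq (result : String) (line : String) :
    (let stripped := PySem.Chars.strip line.toList
     if PySem.Chars.upper (stripped.take 7) = "#EXTINF".toList then
       let i := PySem.Chars.rfind stripped [',']
       let parts := if i < 0 then [stripped]
                    else [stripped.take i.toNat, stripped.drop (i.toNat + 1)]
       let candidate := PySem.Chars.strip ((PySem.List.pyGet? parts (-1)).getD [])
       if candidate ≠ [] then String.ofList candidate else result
     else result) = (pvOpt line).getD result := by
  have hstrip : (PySem.Str.strip line).toList = PySem.Chars.strip line.toList :=
    PySem.Str.toList_strip line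
  have hcomma : (",").toList = [','] := rfl
  simp only [pvOpt, candB_eq, PySem.Str.startswith_eq, PySem.Str.toList_upper,
    PySem.Str.rfind_eq, hcomma, hstrip, cond_iff]
  -- A's stripped rpartition tail, at the character level
  have hcand : (PySem.Str.strip
        (if PySem.Chars.rfind (PySem.Chars.strip line.toList) [','] < 0 then PySem.Str.strip line
         else PySem.Str.slice (PySem.Str.strip line)
           (some (PySem.Chars.rfind (PySem.Chars.strip line.toList) [','] + 1)) none)).toList
      = PySem.Chars.strip (if PySem.Chars.rfind (PySem.Chars.strip line.toList) [','] < 0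
          then PySem.Chars.strip line.toList
          else (PySem.Chars.strip line.toList).drop
            ((PySem.Chars.rfind (PySem.Chars.strip line.toList) [',']).toNat + 1)) := by
    rw [PySem.Str.toList_strip]
    by_cases hi : PySem.Chars.rfind (PySem.Chars.strip line.toList) [','] < 0
    · rw [if_pos hi, if_pos hi, hstrip]
    · rw [if_neg hi, if_neg hi, PySem.Str.toList_slice, PySem.Chars.slice_eq_listSlice,
          hstrip, PySem.List.slice_from _ (by omega), (by omega :
            (PySem.Chars.rfind (PySem.Chars.strip line.toList) [','] + 1).toNat
              = (PySem.Chars.rfind (PySem.Chars.strip line.toList) [',']).toNat + 1)]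
  rw [← hcand]
  set candS := PySem.Str.strip
      (if PySem.Chars.rfind (PySem.Chars.strip line.toList) [','] < 0 then PySem.Str.strip line
       else PySem.Str.slice (PySem.Str.strip line)
         (some (PySem.Chars.rfind (PySem.Chars.strip line.toList) [','] + 1)) none) with hcandS
  by_cases hc : PySem.Chars.startswith
      (PySem.Chars.upper (PySem.Chars.strip line.toList)) "#EXTINF".toList = true
  · rw [if_pos hc]
    simp only [eq_false (not_not_intro hc), if_false]
    by_cases hne : candS = ""
    · have h2 : (candS.toList ≠ []) = False := by simp [hne]
      have h3 : (candS ≠ "") = False := by simp [hne]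
      simp only [h2, h3, if_false, Option.getD_none]
    · have h2 : candS.toList ≠ [] := fun h => hne (String.toList_injective (by simpa using h))
      rw [if_pos h2, if_pos hne, Option.getD_some, String.ofList_toList]
  · rw [if_neg hc]
    simp only [eq_true hc, if_true, Option.getD_none]

theorem foldl_eq (ls : List String) (acc : String) :
    ls.foldl (fun result line =>
      let stripped := PySem.Chars.strip line.toList
      if PySem.Chars.upper (stripped.take 7) = "#EXTINF".toList then
        let i := PySem.Chars.rfind stripped [',']
        let parts := if i < 0 then [stripped]
                     else [stripped.take i.toNat, stripped.drop (i.toNat + 1)]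
        let candidate := PySem.Chars.strip ((PySem.List.pyGet? parts (-1)).getD [])
        if candidate ≠ [] then String.ofList candidate else result
      else result) acc
    = (ls.reverse.findSome? pvOpt).getD acc := by
  induction ls generalizing acc with
  | nil => rfl
  | cons line rest ih =>
      rw [List.foldl_cons, ih, stepB_eq]
      rw [List.reverse_cons, List.findSome?_append]
      cases h : rest.reverse.findSome? pvOpt with
      | some c => simp
      | none =>
          simp only [Option.getD_none]
          cases h2 : pvOpt line <;> simp [List.findSome?, h2]

-- ===== VERDICT (by name: the statement is the Claim_ definition above) =====
theorem extract_channel_name_spec : Claim_equal_extract_channel_name := by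
  intro ls _
  show extract_channel_name ls = extract_channel_name_alt ls
  unfold extract_channel_name extract_channel_name_alt
  rw [goA_eq, foldl_eq]
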